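-- pv_equiv track=rewrite | github.com/riyuna/problem-solving | Codeforce/global17/B.py | solve
-- ===== SOURCE A (Python) =====
-- def ignorepal(L, k):
--     pt1=0
--     pt2=len(L)-1
--     while pt1<pt2:
--         while L[pt1]==k:pt1+=1
--         while L[pt2]==k:pt2-=1
--         if pt1>=pt2:break
--         if L[pt1]!=L[pt2]:
--             return False
--         pt1+=1
--         pt2-=1
--     return True
--
-- def solve(L):
--     pt1=0
--     pt2=len(L)-1
--     rem1=-1
--     rem2=-1
--     diff=False
--     while pt1<pt2:
--         if L[pt1]==L[pt2]:
--             pt1+=1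
--             pt2-=1
--             continue
--         rem1=L[pt1]
--         rem2=L[pt2]
--         break
--
--     return ignorepal(L, rem1) or ignorepal(L, rem2)
-- ===== SOURCE B (Python) =====
-- def solve(L):
--     def pal_without(c):
--         i, j = 0, len(L) - 1
--         while i < j:
--             if L[i] == c:
--                 i += 1
--             elif L[j] == c:
--                 j -= 1
--             elif L[i] != L[j]:
--                 return False
--             else:
--                 i += 1
--                 j -= 1
--         return True
--     if L == L[::-1]:
--         return True
--     return any(pal_without(c) for c in set(L))
-- ===== Notes on version B (the rewrite author's own statement) =====
-- stated objective: alternative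
-- what changed: Instead of locating the first mismatch with two pointers and then testing only its two endpoint values, B tests L itself for palindromicity and then brute-forces every distinct value c of L with an early-exit two-pointer check of whether deleting all copies of c leaves a palindrome.
import Mathlib
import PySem

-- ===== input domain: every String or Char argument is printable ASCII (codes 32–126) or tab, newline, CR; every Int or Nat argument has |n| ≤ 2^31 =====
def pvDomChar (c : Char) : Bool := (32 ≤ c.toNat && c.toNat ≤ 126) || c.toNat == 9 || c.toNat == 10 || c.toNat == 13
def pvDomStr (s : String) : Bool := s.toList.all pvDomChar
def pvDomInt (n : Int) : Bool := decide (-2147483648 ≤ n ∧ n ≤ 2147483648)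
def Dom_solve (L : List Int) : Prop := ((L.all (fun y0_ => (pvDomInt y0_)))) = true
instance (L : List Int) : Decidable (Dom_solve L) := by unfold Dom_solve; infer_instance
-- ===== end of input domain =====

-- B replaces A's two-pointer first-mismatch pass by a plain brute force over the distinct
-- values of L (simpler; equivalence of the return values is proved below).

-- ===== PORT A =====
-- inner `while L[pt1]==k: pt1+=1` of ignorepal (fuel-bounded; inside Pre_ it always
-- stops on an in-range index, exactly where Python stops)
def pvSkipF (L : List Int) (k : Int) : Nat → Int → Int
  | 0, p => p
  | f+1, p => if PySem.List.pyGetD L p 0 == k then pvSkipF L k f (p+1) else p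

-- inner `while L[pt2]==k: pt2-=1` of ignorepal
def pvSkipB (L : List Int) (k : Int) : Nat → Int → Int
  | 0, p => p
  | f+1, p => if PySem.List.pyGetD L p 0 == k then pvSkipB L k f (p-1) else p

-- outer while of ignorepal
def pvIgnoLoop (L : List Int) (k : Int) : Nat → Int → Int → Bool
  | 0, _, _ => true
  | f+1, p1, p2 =>
    if p1 < p2 then
      let q1 := pvSkipF L k (L.length+1) p1
      let q2 := pvSkipB L k (L.length+1) p2
      if q1 ≥ q2 then true
      else if PySem.List.pyGetD L q1 0 != PySem.List.pyGetD L q2 0 then false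
      else pvIgnoLoop L k f (q1+1) (q2-1)
    else true

def pvIgnorepal (L : List Int) (k : Int) : Bool :=
  pvIgnoLoop L k (L.length+1) 0 ((L.length : Int) - 1)

-- first while of solve: returns (rem1, rem2)
def pvFind (L : List Int) : Nat → Int → Int → (Int × Int)
  | 0, _, _ => (-1, -1)
  | f+1, p1, p2 =>
    if p1 < p2 then
      if PySem.List.pyGetD L p1 0 == PySem.List.pyGetD L p2 0 then
        pvFind L f (p1+1) (p2-1)
      else (PySem.List.pyGetD L p1 0, PySem.List.pyGetD L p2 0)
    else (-1, -1)

def solve (L : List Int) : Bool :=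
  let r := pvFind L (L.length+1) 0 ((L.length : Int) - 1)
  pvIgnorepal L r.1 || pvIgnorepal L r.2

-- ===== PORT B =====
def pvPal (l : List Int) : Bool := l == l.reverse

-- inner while of pal_without (fuel-bounded; the pointers always stay in range)
def pvPalWithout (L : List Int) (c : Int) : Nat → Int → Int → Bool
  | 0, _, _ => true
  | f+1, i, j =>
    if i < j then
      if PySem.List.pyGetD L i 0 == c then pvPalWithout L c f (i+1) j
      else if PySem.List.pyGetD L j 0 == c then pvPalWithout L c f i (j-1)
      else if PySem.List.pyGetD L i 0 != PySem.List.pyGetD L j 0 then false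
      else pvPalWithout L c f (i+1) (j-1)
    else true

def solve_alt (L : List Int) : Bool :=
  if pvPal L then true
  else (PySem.Set.ofList L).any (fun c => pvPalWithout L c (L.length+1) 0 ((L.length : Int) - 1))

-- ===== PRECONDITION & SPEC =====
-- Pre_ excludes exactly the lists (length ≥ 2, all elements = -1) on which A's inner
-- skip loop runs past the end of the list and raises IndexError.
def Pre_solve (L : List Int) : Prop := ¬ (2 ≤ L.length ∧ ∀ x ∈ L, x = -1)
instance (L : List Int) : Decidable (Pre_solve L) := by unfold Pre_solve; infer_instance

def pvWitness_solve : List Int := [1, 2]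

def Spec_solve (L : List Int) (out : Bool) : Prop := out = solve_alt L
instance (L : List Int) (out : Bool) : Decidable (Spec_solve L out) := by unfold Spec_solve; infer_instance

-- ===== CLAIM (what is proved, stated in full; the proofs are below) =====
def Claim_equal_solve : Prop := ∀ (L : List Int), Dom_solve L → Pre_solve L → Spec_solve L (solve L)

-- ===== LEMMAS AND PROOFS =====

theorem skipF_eq (L : List Int) (k : Int) : ∀ (f : Nat) (p q : Int), 0 ≤ p → p ≤ q →
    q < L.length → L.getD q.toNat 0 ≠ k → (∀ r : Int, p ≤ r → r < q → L.getD r.toNat 0 = k) →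
    q - p < f → pvSkipF L k f p = q := by
  intro f
  induction f with
  | zero => intro p q _ h2 _ _ _ hf; omega
  | succ f ih =>
    intro p q h0 h2 h3 h4 h5 hf
    rw [pvSkipF, PySem.List.pyGetD_of_nonneg L 0 h0]
    by_cases hpq : p = q
    · subst hpq; simp only [List.getD] at h4; simp [h4]
    · have hk := h5 p le_rfl (by omega)
      simp only [hk, beq_self_eq_true, if_true]
      exact ih (p+1) q (by omega) (by omega) h3 h4 (fun r hr1 hr2 => h5 r (by omega) hr2) (by omega)

theorem skipB_eq (L : List Int) (k : Int) : ∀ (f : Nat) (p q : Int), 0 ≤ q → q ≤ p →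
    p < L.length → L.getD q.toNat 0 ≠ k → (∀ r : Int, q < r → r ≤ p → L.getD r.toNat 0 = k) →
    p - q < f → pvSkipB L k f p = q := by
  intro f
  induction f with
  | zero => intro p q _ h2 _ _ _ hf; omega
  | succ f ih =>
    intro p q h0 h2 h3 h4 h5 hf
    rw [pvSkipB, PySem.List.pyGetD_of_nonneg L 0 (by omega)]
    by_cases hpq : p = q
    · subst hpq; simp only [List.getD] at h4; simp [h4]
    · have hk := h5 p (by omega) le_rfl
      simp only [hk, beq_self_eq_true, if_true]
      exact ih (p-1) q h0 (by omega) (by omega) h4 (fun r hr1 hr2 => h5 r hr1 (by omega)) (by omega)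
def segN (L : List Int) (a len : Nat) : List Int := (L.drop a).take len
def fsegN (L : List Int) (k : Int) (a b : Nat) : List Int :=
  (segN L a (b + 1 - a)).filter (fun x => x != k)
theorem segN_split (L : List Int) (a l1 l2 : Nat) :
    segN L a (l1 + l2) = segN L a l1 ++ segN L (a + l1) l2 := by
  unfold segN; rw [List.take_add, List.drop_drop]
theorem segN_single (L : List Int) {a : Nat} (h : a < L.length) :
    segN L a 1 = [L.getD a 0] := by
  unfold segN
  rw [List.drop_eq_getElem_cons h, List.take_succ_cons, List.take_zero]
  simp [List.getD, List.getElem?_eq_getElem h]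
theorem mem_segN {L : List Int} {a len : Nat} {x : Int} (h : x ∈ segN L a len) :
    ∃ i, i < len ∧ a + i < L.length ∧ x = L.getD (a + i) 0 := by
  unfold segN at h
  obtain ⟨i, hi, hx⟩ := List.mem_iff_getElem.mp h
  have hil : i < len := by have := List.length_take (l := L.drop a) (i := len); omega
  have hia : a + i < L.length := by
    have h1 : i < (L.drop a).length := by have := List.length_take (l := L.drop a) (i := len); omega
    have := List.length_drop (l := L) (i := a); omega
  refine ⟨i, hil, hia, ?_⟩
  have hg : ((L.drop a).take len)[i] = L[a + i] := by rw [List.getElem_take, List.getElem_drop]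
  rw [← hx, hg]
  simp [List.getD, List.getElem?_eq_getElem hia]
theorem filter_segN_nil {L : List Int} {k : Int} {a len : Nat}
    (h : ∀ r, a ≤ r → r < a + len → r < L.length → L.getD r 0 = k) :
    (segN L a len).filter (fun x => x != k) = [] := by
  rw [List.filter_eq_nil_iff]
  intro x hx
  obtain ⟨i, hil, hia, hxe⟩ := mem_segN hx
  have h2 := h (a + i) (by omega) (by omega) hia
  simp only [List.getD] at h2
  simp [hxe, List.getD, h2]

theorem pvPal_iff {l m : List Int} (h : (l = l.reverse) ↔ (m = m.reverse)) : pvPal l = pvPal m := by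
  rw [Bool.eq_iff_iff]; simpa [pvPal] using h
theorem pvPal_true {l : List Int} (h : l = l.reverse) : pvPal l = true := by simp [pvPal, ← h]
theorem pvPal_false {l : List Int} (h : ¬ (l = l.reverse)) : pvPal l = false := by simp [pvPal, h]
theorem pal_len_le_one {l : List Int} (h : l.length ≤ 1) : l = l.reverse := by
  match l, h with
  | [], _ => rfl
  | [a], _ => rfl

-- strip all-k runs from both ends of the segment
theorem fseg_strip {L : List Int} {k : Int} {a a' b' b : Nat}
    (h1 : a ≤ a') (h2 : a' ≤ b' + 1) (h3 : b' ≤ b) (_h4 : b < L.length)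
    (hlo : ∀ r, a ≤ r → r < a' → L.getD r 0 = k)
    (hhi : ∀ r, b' < r → r ≤ b → L.getD r 0 = k) :
    fsegN L k a b = fsegN L k a' b' := by
  unfold fsegN
  have e : b + 1 - a = (a' - a) + ((b' + 1 - a') + (b - b')) := by omega
  rw [e, segN_split, segN_split]
  have e2 : a + (a' - a) = a' := by omega
  have e3 : a' + (b' + 1 - a') = b' + 1 := by omega
  rw [e2, e3]
  rw [List.filter_append, List.filter_append]
  have n1 : (segN L a (a' - a)).filter (fun x => x != k) = [] :=
    filter_segN_nil (fun r hr1 hr2 _ => hlo r hr1 (by omega))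
  have n2 : (segN L (b' + 1) (b - b')).filter (fun x => x != k) = [] :=
    filter_segN_nil (fun r hr1 hr2 _ => hhi r (by omega) (by omega))
  rw [n1, n2]
  simp

-- a segment [a..b] with a < b, whose endpoints are not k, filters to  L[a] :: mid ++ [L[b]]
theorem fseg_ends {L : List Int} {k : Int} {a b : Nat} (hab : a < b) (hb : b < L.length)
    (ha' : L.getD a 0 ≠ k) (hb' : L.getD b 0 ≠ k) :
    fsegN L k a b = L.getD a 0 :: fsegN L k (a+1) (b-1) ++ [L.getD b 0] := by
  unfold fsegN
  have e : b + 1 - a = 1 + ((b - 1 + 1 - (a + 1)) + 1) := by omega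
  rw [e, segN_split, segN_split]
  have e2 : a + 1 + (b - 1 + 1 - (a + 1)) = b := by omega
  rw [e2, segN_single L (by omega), segN_single L hb]
  rw [List.filter_append, List.filter_append]
  simp only [List.getD] at ha' hb'
  have b1 : (L[a]?.getD 0 != k) = true := bne_iff_ne.mpr ha'
  have b2 : (L[b]?.getD 0 != k) = true := bne_iff_ne.mpr hb'
  simp [List.filter, b1, b2]
theorem pal_sandwich (v w : List Int) :
    (v ++ w ++ v.reverse) = (v ++ w ++ v.reverse).reverse ↔ w = w.reverse := by
  rw [List.reverse_append, List.reverse_append, List.reverse_reverse, List.append_assoc]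
  constructor
  · intro h
    have h2 := List.append_cancel_left h
    exact (List.append_cancel_right (h2.symm)).symm
  · intro h
    rw [← h]

theorem not_pal_head_last {l : List Int} {a b : Int}
    (ha : l.head? = some a) (hb : l.getLast? = some b) (hab : a ≠ b) :
    ¬ (l = l.reverse) := by
  intro h
  apply hab
  have hh : l.reverse.head? = l.getLast? := List.head?_reverse
  rw [← h, ha, hb] at hh
  exact Option.some.inj hh

theorem fseg_short {L : List Int} {k : Int} {p1 p2 : Int} (h0 : 0 ≤ p1) (h : p2 ≤ p1) :
    pvPal (fsegN L k p1.toNat p2.toNat) = true := by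
  apply pvPal_true
  apply pal_len_le_one
  have h1 := List.length_filter_le (fun x => x != k) (segN L p1.toNat (p2.toNat + 1 - p1.toNat))
  have h2 : (segN L p1.toNat (p2.toNat + 1 - p1.toNat)).length ≤ p2.toNat + 1 - p1.toNat := by
    unfold segN
    have := List.length_take (l := L.drop p1.toNat) (i := p2.toNat + 1 - p1.toNat)
    omega
  unfold fsegN
  omega

theorem ignoLoop_eq (L : List Int) (k : Int) : ∀ (f : Nat) (p1 p2 : Int),
    0 ≤ p1 → p2 < L.length →
    (p1 < p2 → (∃ qa : Int, p1 ≤ qa ∧ qa < L.length ∧ L.getD qa.toNat 0 ≠ k) ∧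
               (∃ qb : Int, 0 ≤ qb ∧ qb ≤ p2 ∧ L.getD qb.toNat 0 ≠ k)) →
    p2 - p1 < 2 * f →
    pvIgnoLoop L k f p1 p2 = pvPal (fsegN L k p1.toNat p2.toNat) := by
  intro f
  induction f with
  | zero =>
    intro p1 p2 h0 hn hinv hf
    rw [pvIgnoLoop]
    exact (fseg_short h0 (by omega)).symm
  | succ f ih =>
    intro p1 p2 h0 hn hinv hf
    rw [pvIgnoLoop]
    by_cases hlt : p1 < p2
    · obtain ⟨⟨qa, hqa1, hqa2, hqa3⟩, ⟨qb, hqb1, hqb2, hqb3⟩⟩ := hinv hlt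
      have hp2nn : 0 ≤ p2 := by omega
      -- minimal stopping index of the forward skip
      have hPex : ∃ m : Nat, p1 ≤ (m:Int) ∧ m < L.length ∧ L.getD m 0 ≠ k := by
        refine ⟨qa.toNat, ?_, ?_, ?_⟩
        · rw [Int.toNat_of_nonneg (by omega)]; exact hqa1
        · omega
        · exact hqa3
      have hq1P := Nat.find_spec hPex
      have hq1min : ∀ r, r < Nat.find hPex → ¬ (p1 ≤ (r:Int) ∧ r < L.length ∧ L.getD r 0 ≠ k) :=
        fun r hr => Nat.find_min hPex hr
      set q1N := Nat.find hPex with hq1N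
      -- maximal stopping index of the backward skip
      set Q : Nat → Prop := fun m => (m:Int) ≤ p2 ∧ L.getD m 0 ≠ k with hQdef
      have hQqb : Q qb.toNat := by
        constructor
        · rw [Int.toNat_of_nonneg hqb1]; exact hqb2
        · simpa [Int.toNat_of_nonneg hqb1] using hqb3
      set q2N := Nat.findGreatest Q p2.toNat with hq2N
      have hq2P : Q q2N := Nat.findGreatest_spec (by omega) hQqb
      have hq2max : ∀ r, q2N < r → r ≤ p2.toNat → ¬ Q r :=
        fun r h1 h2 => Nat.findGreatest_is_greatest h1 h2
      have hq2le : q2N ≤ p2.toNat := Nat.findGreatest_le _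
      have hskF : pvSkipF L k (L.length+1) p1 = (q1N : Int) := by
        apply skipF_eq L k (L.length+1) p1 (q1N:Int) h0 hq1P.1 (by exact_mod_cast Nat.cast_lt.mpr hq1P.2.1)
        · simpa using hq1P.2.2
        · intro r hr1 hr2
          have hr0 : 0 ≤ r := le_trans h0 hr1
          by_contra hrk
          exact hq1min r.toNat (by omega) ⟨by rwa [Int.toNat_of_nonneg hr0], by omega, hrk⟩
        · omega
      have hskB : pvSkipB L k (L.length+1) p2 = (q2N : Int) := by
        apply skipB_eq L k (L.length+1) p2 (q2N:Int) (by omega) (by omega) hn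
        · simpa using hq2P.2
        · intro r hr1 hr2
          have hr0 : 0 ≤ r := by omega
          by_contra hrk
          exact hq2max r.toNat (by omega) (by omega) ⟨by rwa [Int.toNat_of_nonneg hr0], hrk⟩
        · omega
      rw [if_pos hlt]
      simp only [hskF, hskB]
      -- facts about the strips, used by every branch
      have hlo : ∀ r, p1.toNat ≤ r → r < q1N → L.getD r 0 = k := by
        intro r hr1 hr2
        by_contra hrk
        exact hq1min r hr2 ⟨by omega, by omega, hrk⟩
      have hhi : ∀ r, q2N < r → r ≤ p2.toNat → L.getD r 0 = k := by
        intro r hr1 hr2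
        by_contra hrk
        exact hq2max r hr1 hr2 ⟨by omega, hrk⟩
      by_cases hge : (q1N:Int) ≥ (q2N:Int)
      · rw [if_pos hge]
        rcases Nat.lt_or_ge q2N q1N with hgt | hle'
        · -- every element of the segment equals k
          have hall : ∀ r, p1.toNat ≤ r → r < p1.toNat + (p2.toNat + 1 - p1.toNat) → r < L.length →
              L.getD r 0 = k := by
            intro r hr1 hr2 hr3
            by_contra hrk
            have hfind : q1N ≤ r := Nat.find_min' hPex ⟨by omega, hr3, hrk⟩
            have hgr : r ≤ q2N := Nat.le_findGreatest (by omega) ⟨by omega, hrk⟩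
            omega
          have : fsegN L k p1.toNat p2.toNat = [] := filter_segN_nil hall
          rw [show pvPal (fsegN L k p1.toNat p2.toNat) = true from by rw [this]; rfl]
        · have hmeq : q1N = q2N := by omega
          have hstrip : fsegN L k p1.toNat p2.toNat = fsegN L k q1N q1N := by
            apply fseg_strip (by omega) (by omega) (by omega) (by omega) hlo
            intro r h1 h2; exact hhi r (by omega) h2
          have hsing : fsegN L k q1N q1N = [L.getD q1N 0] := by
            unfold fsegN
            rw [show q1N + 1 - q1N = 1 from by omega, segN_single L (by omega)]
            have b1 : (L.getD q1N 0 != k) = true := bne_iff_ne.mpr hq1P.2.2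
            simp only [List.getD] at b1 ⊢
            simp [List.filter, b1]
          rw [hstrip, hsing]
          rw [pvPal_true (pal_len_le_one (by simp))]
      · rw [if_neg hge]
        have hq12 : q1N < q2N := by omega
        have hg1 : PySem.List.pyGetD L (q1N:Int) 0 = L.getD q1N 0 := by
          rw [PySem.List.pyGetD_of_nonneg L 0 (by omega)]; simp
        have hg2 : PySem.List.pyGetD L (q2N:Int) 0 = L.getD q2N 0 := by
          rw [PySem.List.pyGetD_of_nonneg L 0 (by omega)]; simp
        rw [hg1, hg2]
        have hstrip : fsegN L k p1.toNat p2.toNat = fsegN L k q1N q2N := by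
          apply fseg_strip (by omega) (by omega) (by omega) (by omega) hlo hhi
        have hends : fsegN L k q1N q2N =
            L.getD q1N 0 :: fsegN L k (q1N+1) (q2N-1) ++ [L.getD q2N 0] :=
          fseg_ends hq12 (by omega) hq1P.2.2 hq2P.2
        by_cases hne : L.getD q1N 0 = L.getD q2N 0
        · rw [show (L.getD q1N 0 != L.getD q2N 0) = false from by rw [hne]; exact bne_self_eq_false _]
          rw [if_neg Bool.false_ne_true]
          have e1 : (q1N:Int) + 1 = ((q1N+1 : Nat) : Int) := by push_cast; ring
          have e2 : (q2N:Int) - 1 = ((q2N-1 : Nat) : Int) := by omega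
          rw [e1, e2]
          rw [ih ((q1N+1 : Nat) : Int) ((q2N-1 : Nat) : Int) (by positivity) (by omega) ?_ (by omega)]
          · have : pvPal (fsegN L k p1.toNat p2.toNat) =
                pvPal (fsegN L k (q1N+1) (q2N-1)) := by
              rw [hstrip, hends]
              apply pvPal_iff
              rw [hne]
              have : L.getD q2N 0 :: fsegN L k (q1N+1) (q2N-1) ++ [L.getD q2N 0] =
                  [L.getD q2N 0] ++ fsegN L k (q1N+1) (q2N-1) ++ [L.getD q2N 0].reverse := by
                simp
              rw [this]
              exact pal_sandwich [L.getD q2N 0] (fsegN L k (q1N+1) (q2N-1))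
            rw [this]
            congr 1
          · intro hlt2
            constructor
            · exact ⟨(q2N:Int), by omega, by omega, by simpa using hq2P.2⟩
            · exact ⟨(q1N:Int), by omega, by omega, by simpa using hq1P.2.2⟩
        · rw [if_pos (bne_iff_ne.mpr hne)]
          have : ¬ (fsegN L k p1.toNat p2.toNat = (fsegN L k p1.toNat p2.toNat).reverse) := by
            rw [hstrip, hends]
            apply not_pal_head_last (a := L.getD q1N 0) (b := L.getD q2N 0) _ _ hne
            · rfl
            · rw [show (L.getD q1N 0 :: fsegN L k (q1N+1) (q2N-1) ++ [L.getD q2N 0]) =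
                  (L.getD q1N 0 :: fsegN L k (q1N+1) (q2N-1)) ++ [L.getD q2N 0] from by simp]
              exact List.getLast?_concat
          rw [pvPal_false this]
    · rw [if_neg hlt]
      exact (fseg_short h0 (by omega)).symm

theorem getDg {L : List Int} {m : Nat} (h : m < L.length) : L.getD m 0 = L[m] := by
  simp [List.getD, List.getElem?_eq_getElem h]

theorem fseg_full (L : List Int) (k : Int) :
    fsegN L k ((0:Int)).toNat (((L.length:Int) - 1)).toNat = L.filter (fun x => x != k) := by
  unfold fsegN segN
  by_cases hL : L.length = 0
  · have : L = [] := List.eq_nil_of_length_eq_zero hL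
    subst this; rfl
  · have e : ((L.length:Int)-1).toNat = L.length - 1 := by omega
    rw [e]
    rw [show (0:Int).toNat = 0 from rfl, show L.length - 1 + 1 - 0 = L.length from by omega]
    rw [List.drop_zero, List.take_length]

theorem palWithout_eq (L : List Int) (c : Int) : ∀ (f : Nat) (i j : Int),
    0 ≤ i → j < L.length → j - i < f →
    pvPalWithout L c f i j = pvPal (fsegN L c i.toNat j.toNat) := by
  intro f
  induction f with
  | zero =>
    intro i j h0 hn hf
    rw [pvPalWithout]
    exact (fseg_short h0 (by omega)).symm
  | succ f ih =>
    intro i j h0 hn hf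
    rw [pvPalWithout]
    by_cases hlt : i < j
    · rw [if_pos hlt]
      have hg1 : PySem.List.pyGetD L i 0 = L.getD i.toNat 0 := PySem.List.pyGetD_of_nonneg L 0 h0
      have hg2 : PySem.List.pyGetD L j 0 = L.getD j.toNat 0 := PySem.List.pyGetD_of_nonneg L 0 (by omega)
      rw [hg1, hg2]
      have hij : i.toNat < j.toNat := by omega
      have hjn : j.toNat < L.length := by omega
      by_cases hic : L.getD i.toNat 0 = c
      · rw [if_pos (beq_iff_eq.mpr hic)]
        rw [ih (i+1) j (by omega) hn (by omega)]
        rw [show (i+1).toNat = i.toNat + 1 from by omega]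
        congr 1
        apply (fseg_strip (by omega) (by omega) (le_refl j.toNat) hjn ?_ ?_).symm
        · intro r hr1 hr2
          rw [show r = i.toNat from by omega]
          exact hic
        · intro r hr1 hr2; omega
      · rw [if_neg (by simpa using hic)]
        by_cases hjc : L.getD j.toNat 0 = c
        · rw [if_pos (beq_iff_eq.mpr hjc)]
          rw [ih i (j-1) h0 (by omega) (by omega)]
          rw [show (j-1).toNat = j.toNat - 1 from by omega]
          congr 1
          apply (fseg_strip (le_refl i.toNat) (by omega) (by omega) hjn ?_ ?_).symm
          · intro r hr1 hr2; omega
          · intro r hr1 hr2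
            rw [show r = j.toNat from by omega]
            exact hjc
        · rw [if_neg (by simpa using hjc)]
          have hends := fseg_ends (L := L) (k := c) hij hjn hic hjc
          by_cases hne : L.getD i.toNat 0 = L.getD j.toNat 0
          · rw [show (L.getD i.toNat 0 != L.getD j.toNat 0) = false from by
              rw [hne]; exact bne_self_eq_false _]
            rw [if_neg Bool.false_ne_true]
            rw [ih (i+1) (j-1) (by omega) (by omega) (by omega)]
            rw [show (i+1).toNat = i.toNat + 1 from by omega,
                show (j-1).toNat = j.toNat - 1 from by omega]
            apply (pvPal_iff ?_).symm
            rw [hends, hne]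
            rw [show (L.getD j.toNat 0 :: fsegN L c (i.toNat+1) (j.toNat-1) ++ [L.getD j.toNat 0]) =
                [L.getD j.toNat 0] ++ fsegN L c (i.toNat+1) (j.toNat-1) ++ [L.getD j.toNat 0].reverse
                from by simp]
            exact pal_sandwich [L.getD j.toNat 0] (fsegN L c (i.toNat+1) (j.toNat-1))
          · rw [if_pos (bne_iff_ne.mpr hne)]
            apply (pvPal_false ?_).symm
            rw [hends]
            apply not_pal_head_last rfl ?_ hne
            rw [show (L.getD i.toNat 0 :: fsegN L c (i.toNat+1) (j.toNat-1) ++ [L.getD j.toNat 0]) =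
                (L.getD i.toNat 0 :: fsegN L c (i.toNat+1) (j.toNat-1)) ++ [L.getD j.toNat 0]
                from by simp]
            exact List.getLast?_concat
    · rw [if_neg hlt]
      exact (fseg_short h0 (by omega)).symm

theorem ignorepal_eq (L : List Int) (k : Int) (h : 2 ≤ L.length → ∃ x ∈ L, x ≠ k) :
    pvIgnorepal L k = pvPal (L.filter (fun x => x != k)) := by
  unfold pvIgnorepal
  rw [ignoLoop_eq L k (L.length+1) 0 ((L.length:Int)-1) le_rfl (by omega) ?inv (by omega)]
  case inv =>
    intro hlt
    obtain ⟨x, hx, hxk⟩ := h (by omega)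
    obtain ⟨i, hi, hieq⟩ := List.mem_iff_getElem.mp hx
    have hgi : L.getD ((i:Int)).toNat 0 ≠ k := by
      simp only [Int.toNat_natCast]
      rw [getDg hi, hieq]
      exact hxk
    exact ⟨⟨(i:Int), by omega, by omega, hgi⟩, ⟨(i:Int), by omega, by omega, hgi⟩⟩
  rw [fseg_full]

theorem pal_of_mirror (L : List Int) (i : Nat)
    (hm : ∀ m, m < i → L.getD m 0 = L.getD (L.length-1-m) 0)
    (hi : L.length ≤ 2*i+1) : L = L.reverse := by
  apply List.ext_getElem (by simp)
  intro m h1 h2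
  rw [List.getElem_reverse]
  by_cases hc1 : m < i
  · have := hm m hc1
    rwa [getDg (by omega), getDg (by omega)] at this
  · by_cases hc2 : L.length - 1 - m < i
    · have h3 := hm (L.length - 1 - m) hc2
      rw [show L.length - 1 - (L.length - 1 - m) = m from by omega] at h3
      rw [getDg (by omega), getDg (by omega)] at h3
      exact h3.symm
    · congr 1; omega

theorem find_eq (L : List Int) : ∀ (f : Nat) (i : Nat),
    (∀ m, m < i → L.getD m 0 = L.getD (L.length - 1 - m) 0) →
    L.length ≤ 2 * f + 2 * i →
    (L = L.reverse ∧ pvFind L f (i:Int) ((L.length:Int) - 1 - i) = (-1, -1)) ∨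
    (∃ j : Nat, i ≤ j ∧ 2 * j + 1 < L.length ∧
      L.getD j 0 ≠ L.getD (L.length - 1 - j) 0 ∧
      (∀ m, m < j → L.getD m 0 = L.getD (L.length - 1 - m) 0) ∧
      pvFind L f (i:Int) ((L.length:Int) - 1 - i) = (L.getD j 0, L.getD (L.length - 1 - j) 0)) := by
  intro f
  induction f with
  | zero =>
    intro i hm hf
    rw [pvFind]
    exact Or.inl ⟨pal_of_mirror L i hm (by omega), rfl⟩
  | succ f ih =>
    intro i hm hf
    rw [pvFind]
    by_cases hlt : (i:Int) < (L.length:Int) - 1 - i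
    · rw [if_pos hlt]
      have hg1 : PySem.List.pyGetD L (i:Int) 0 = L.getD i 0 := by
        rw [PySem.List.pyGetD_of_nonneg L 0 (by omega)]; simp
      have hg2 : PySem.List.pyGetD L ((L.length:Int) - 1 - i) 0 = L.getD (L.length - 1 - i) 0 := by
        rw [PySem.List.pyGetD_of_nonneg L 0 (by omega)]
        congr 1
        omega
      rw [hg1, hg2]
      by_cases heq : L.getD i 0 = L.getD (L.length - 1 - i) 0
      · rw [if_pos (beq_iff_eq.mpr heq)]
        have e1 : (i:Int) + 1 = ((i+1 : Nat) : Int) := by push_cast; ring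
        have e2 : (L.length:Int) - 1 - i - 1 = (L.length:Int) - 1 - ((i+1 : Nat) : Int) := by
          push_cast; ring
        rw [e1, e2]
        have hm' : ∀ m, m < i + 1 → L.getD m 0 = L.getD (L.length - 1 - m) 0 := by
          intro m hmi
          by_cases hmi' : m < i
          · exact hm m hmi'
          · have : m = i := by omega
            subst this; exact heq
        rcases ih (i+1) hm' (by omega) with ⟨hp, he⟩ | ⟨j, hj1, hj2, hj3, hj4, hj5⟩
        · exact Or.inl ⟨hp, he⟩
        · exact Or.inr ⟨j, by omega, hj2, hj3, hj4, hj5⟩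
      · rw [if_neg (by simpa using heq)]
        exact Or.inr ⟨i, le_rfl, by omega, heq, hm, rfl⟩
    · rw [if_neg hlt]
      exact Or.inl ⟨pal_of_mirror L i hm (by omega), rfl⟩

theorem seg_ends {L : List Int} {a b : Nat} (hab : a < b) (hb : b < L.length) :
    segN L a (b+1-a) = L.getD a 0 :: segN L (a+1) (b-1-a) ++ [L.getD b 0] := by
  have e : b + 1 - a = 1 + ((b - 1 - a) + 1) := by omega
  rw [e, segN_split, segN_split]
  have e2 : a + 1 + (b - 1 - a) = b := by omega
  rw [e2, segN_single L (by omega), segN_single L hb]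
  simp

theorem mirror_decomp (L : List Int) (j : Nat) (hj : 2*j ≤ L.length)
    (hm : ∀ m, m < j → L.getD m 0 = L.getD (L.length-1-m) 0) :
    L = L.take j ++ segN L j (L.length - 2*j) ++ (L.take j).reverse := by
  have hdr : List.drop (L.length - j) L = (L.take j).reverse := by
    apply List.ext_getElem
    · simp; omega
    · intro m h1 h2
      have hm2 : m < j := by simp at h2; omega
      rw [List.getElem_drop, List.getElem_reverse, List.getElem_take]
      have h3 := hm (j - 1 - m) (by omega)
      rw [show L.length - 1 - (j - 1 - m) = L.length - j + m from by omega] at h3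
      rw [getDg (by omega), getDg (by omega)] at h3
      rw [← h3]
      congr 1
      simp [List.length_take]
      omega
  have h5 : segN L j (L.length - 2*j) ++ List.drop (L.length - j) L = List.drop j L := by
    unfold segN
    rw [show L.length - j = j + (L.length - 2*j) from by omega, ← List.drop_drop]
    exact List.take_append_drop _ _
  conv_lhs => rw [← List.take_append_drop j L]
  rw [List.append_assoc, ← hdr, h5]

theorem solve_eq_alt (L : List Int) (hpre : ¬ (2 ≤ L.length ∧ ∀ x ∈ L, x = -1)) :
    solve L = solve_alt L := by
  have hfind := find_eq L (L.length+1) 0 (fun m hm => absurd hm (Nat.not_lt_zero m)) (by omega)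
  simp only [Nat.cast_zero, sub_zero] at hfind
  rcases hfind with ⟨hp, he⟩ | ⟨j, _, hj2, hj3, hj4, he⟩
  · -- no mismatch: L is a palindrome
    have hs : solve L = (pvIgnorepal L (-1) || pvIgnorepal L (-1)) := by
      unfold solve; rw [he]
    rw [hs]; unfold solve_alt
    have hig : pvIgnorepal L (-1) = pvPal (L.filter (fun x => x != (-1 : Int))) := by
      apply ignorepal_eq
      intro h2
      have h3 := not_and.mp hpre h2
      push Not at h3
      exact h3
    have hfp : pvPal (L.filter (fun x => x != (-1 : Int))) = true := by
      apply pvPal_true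
      conv_lhs => rw [hp]
      rw [List.filter_reverse]
    simp [hig, hfp, pvPal_true hp]
  · -- first mismatch: a = L[j] ≠ L[n-1-j] = b
    have hs : solve L =
        (pvIgnorepal L (L.getD j 0) || pvIgnorepal L (L.getD (L.length-1-j) 0)) := by
      unfold solve; rw [he]
    rw [hs]; unfold solve_alt
    have hdec := mirror_decomp L j (by omega) hj4
    have hseg : segN L j (L.length - 2*j) =
        L.getD j 0 :: segN L (j+1) (L.length-1-j-1-j) ++ [L.getD (L.length-1-j) 0] := by
      have h7 := seg_ends (L := L) (a := j) (b := L.length-1-j) (by omega) (by omega)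
      rw [show L.length-1-j+1-j = L.length-2*j from by omega] at h7
      exact h7
    have hlast : ∀ (w : List Int),
        (L.getD j 0 :: w ++ [L.getD (L.length-1-j) 0]).getLast? = some (L.getD (L.length-1-j) 0) := by
      intro w
      rw [show (L.getD j 0 :: w ++ [L.getD (L.length-1-j) 0]) =
          (L.getD j 0 :: w) ++ [L.getD (L.length-1-j) 0] from by simp]
      exact List.getLast?_concat
    have hnotpal : ¬ (L = L.reverse) := by
      intro hcon
      rw [hdec] at hcon
      have h6 := (pal_sandwich _ _).mp hcon
      rw [hseg] at h6
      exact not_pal_head_last rfl (hlast _) hj3 h6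
    have hother : ∀ v : Int, v ≠ L.getD j 0 → v ≠ L.getD (L.length-1-j) 0 →
        ¬ (L.filter (fun x => x != v) = (L.filter (fun x => x != v)).reverse) := by
      intro v hva hvb hcon
      rw [hdec] at hcon
      rw [List.filter_append, List.filter_append, List.filter_reverse] at hcon
      have h6 := (pal_sandwich _ _).mp hcon
      have c1 : ((L.getD j 0) != v) = true := bne_iff_ne.mpr (fun h => hva h.symm)
      have c2 : ((L.getD (L.length-1-j) 0) != v) = true := bne_iff_ne.mpr (fun h => hvb h.symm)
      rw [hseg] at h6
      simp only [List.filter_cons, List.filter_append, List.filter_nil, c1, c2, if_true] at h6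
      exact not_pal_head_last rfl (hlast _) hj3 h6
    have hmema : L.getD j 0 ∈ L := by rw [getDg (by omega)]; exact List.getElem_mem _
    have hmemb : L.getD (L.length-1-j) 0 ∈ L := by rw [getDg (by omega)]; exact List.getElem_mem _
    have higa : pvIgnorepal L (L.getD j 0) =
        pvPal (L.filter (fun x => x != L.getD j 0)) :=
      ignorepal_eq L _ (fun _ => ⟨L.getD (L.length-1-j) 0, hmemb, Ne.symm hj3⟩)
    have higb : pvIgnorepal L (L.getD (L.length-1-j) 0) =
        pvPal (L.filter (fun x => x != L.getD (L.length-1-j) 0)) :=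
      ignorepal_eq L _ (fun _ => ⟨L.getD j 0, hmema, hj3⟩)
    rw [higa, higb, pvPal_false hnotpal, if_neg Bool.false_ne_true]
    have halt : ∀ c : Int, pvPalWithout L c (L.length + 1) 0 ((L.length:Int) - 1) =
        pvPal (L.filter (fun x => x != c)) := by
      intro c
      rw [palWithout_eq L c (L.length+1) 0 ((L.length:Int)-1) le_rfl (by omega) (by omega),
          fseg_full]
    simp only [halt]
    rw [Bool.eq_iff_iff]
    simp only [Bool.or_eq_true, List.any_eq_true]
    constructor
    · rintro (hpa | hpb)
      · exact ⟨L.getD j 0, (PySem.Set.mem_ofList L _).mpr hmema, hpa⟩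
      · exact ⟨L.getD (L.length-1-j) 0, (PySem.Set.mem_ofList L _).mpr hmemb, hpb⟩
    · rintro ⟨c, hc, hpc⟩
      by_cases hca : c = L.getD j 0
      · subst hca; exact Or.inl hpc
      by_cases hcb : c = L.getD (L.length-1-j) 0
      · subst hcb; exact Or.inr hpc
      · exact absurd hpc (by rw [pvPal_false (hother c hca hcb)]; simp)

-- ===== VERDICT (by name: the statement is the Claim_ definition above) =====
theorem solve_spec : Claim_equal_solve := by
  intro L _ hpre
  unfold Spec_solve
  exact solve_eq_alt L hpre
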